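-- pv_equiv track=rewrite | github.com/DrDomenicoMarson/PoreMS | porems/store.py | _decode_pure
-- ===== SOURCE A (Python) =====
-- def _decode_pure(digits, token):
--     """Decode one positional token produced by :func:`_encode_pure`.
--
--     Parameters
--     ----------
--     digits : str
--         Digits used by the positional numeral system.
--     token : str
--         Fixed-width encoded token.
--
--     Returns
--     -------
--     value : int
--         Decoded integer value.
--
--     Raises
--     ------
--     ValueError
--         Raised when ``token`` contains a character outside ``digits``.
--     """
--     base = len(digits)
--     value = 0
--     for char in token:
--         try:
--             digit = digits.index(char)
--         except ValueError as exc: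
--             raise ValueError(f"Invalid digit {char!r} in token {token!r}.") from exc
--         value = value * base + digit
--     return value
-- ===== SOURCE B (Python) =====
-- def _decode_pure(digits, token):
--     """Decode one positional token: digit list first, then a right-to-left
--     place-value accumulation with a running weight."""
--     base = len(digits)
--     idxs = []
--     for char in token:
--         try:
--             idxs.append(digits.index(char))
--         except ValueError as exc:
--             raise ValueError(f"Invalid digit {char!r} in token {token!r}.") from exc
--     total = 0
--     weight = 1
--     for digit in reversed(idxs):
--         total += digit * weight
--         weight *= base
--     return total
-- ===== Notes on version B (the rewrite author's own statement) =====
-- stated objective: alternative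
-- what changed: Replaces Horner's single left-to-right multiply-accumulate with two phases: a validation pass building the digit list, then a right-to-left place-value accumulation maintaining a running weight (total += digit*weight; weight *= base).
import Mathlib
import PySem

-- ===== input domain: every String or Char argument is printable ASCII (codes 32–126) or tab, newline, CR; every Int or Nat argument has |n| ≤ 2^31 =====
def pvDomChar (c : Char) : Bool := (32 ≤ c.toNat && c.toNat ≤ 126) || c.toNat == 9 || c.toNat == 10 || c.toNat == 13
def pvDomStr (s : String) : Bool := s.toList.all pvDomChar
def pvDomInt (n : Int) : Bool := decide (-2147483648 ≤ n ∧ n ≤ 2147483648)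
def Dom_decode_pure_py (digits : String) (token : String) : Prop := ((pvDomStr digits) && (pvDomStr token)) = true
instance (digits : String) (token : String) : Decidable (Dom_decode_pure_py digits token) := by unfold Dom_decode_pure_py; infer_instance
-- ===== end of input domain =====

-- B replaces A's single Horner multiply-accumulate pass with two phases: a digit-list
-- build, then a right-to-left place-value accumulation with a running weight (objective: alternative).

-- ===== PORT A =====
-- Horner's method: value = value * base + digit, left to right.
-- digits.index(char): single-char substring search = first index in the char list;
-- the .getD 0 default is only reached where Python raises ValueError (outside Pre_).
def decode_pure_py (digits : String) (token : String) : Int :=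
  token.toList.foldl
    (fun value c =>
      value * (digits.toList.length : Int)
        + (((PySem.List.index? digits.toList c).getD 0 : Nat) : Int))
    0

-- ===== PORT B =====
-- Phase 1 builds the digit list (the append loop, as a map); phase 2 folds over the
-- reversed list with state (total, weight): total += digit * weight; weight *= base.
def decode_pure_py_alt (digits : String) (token : String) : Int :=
  let base : Int := digits.toList.length
  let idxs : List Int :=
    token.toList.map (fun c => (((PySem.List.index? digits.toList c).getD 0 : Nat) : Int))
  (idxs.reverse.foldl (fun p d => (p.1 + d * p.2, p.2 * base)) ((0 : Int), (1 : Int))).1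

-- ===== PRECONDITION & SPEC =====
-- Pre_ excludes tokens containing a character not in digits: there Python A raises ValueError.
def Pre_decode_pure_py (digits : String) (token : String) : Prop :=
  token.toList.all (fun c => digits.toList.contains c) = true
instance (digits : String) (token : String) : Decidable (Pre_decode_pure_py digits token) := by
  unfold Pre_decode_pure_py; infer_instance

def pvWitness_decode_pure_py : String × String := ("abc", "cab")

def Spec_decode_pure_py (digits : String) (token : String) (out : Int) : Prop := out = decode_pure_py_alt digits token
instance (digits : String) (token : String) (out : Int) : Decidable (Spec_decode_pure_py digits token out) := by unfold Spec_decode_pure_py; infer_instance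

-- ===== CLAIM (what is proved, stated in full; the proofs are below) =====
def Claim_equal_decode_pure_py : Prop := ∀ (digits : String) (token : String), Dom_decode_pure_py digits token → Pre_decode_pure_py digits token → Spec_decode_pure_py digits token (decode_pure_py digits token)

-- ===== LEMMAS AND PROOFS =====

-- Invariant of B's second phase: folding (total, weight) over r adds weight times the
-- Horner value of r.reverse to total.
theorem pv_weight (b : Int) (r : List Int) :
    ∀ t w : Int, (r.foldl (fun p d => (p.1 + d * p.2, p.2 * b)) (t, w)).1
      = t + w * (r.reverse.foldl (fun v d => v * b + d) 0) := by
  induction r with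
  | nil => intro t w; simp
  | cons d r ih =>
    intro t w
    simp only [List.foldl_cons, List.reverse_cons, List.foldl_append, List.foldl_cons,
      List.foldl_nil]
    rw [ih (t + d * w) (w * b)]
    ring

-- ===== VERDICT (by name: the statement is the Claim_ definition above) =====
theorem decode_pure_py_spec : Claim_equal_decode_pure_py := by
  intro digits token _ _
  unfold Spec_decode_pure_py decode_pure_py decode_pure_py_alt
  rw [pv_weight, List.reverse_reverse, List.foldl_map, one_mul, zero_add]
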